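-- pv_equiv track=rewrite | github.com/RajaGiddi/Adaptive-Hiearchial-Graph-Chunking | scripts/eval_retrieval.py | _simple_tokenize
-- ===== SOURCE A (Python) =====
-- from typing import Any, Dict, List, Tuple
--
-- def _simple_tokenize(text: str) -> List[str]:
--     out: List[str] = []
--     buf: List[str] = []
--     for ch in text.lower():
--         if ch.isalnum():
--             buf.append(ch)
--         else:
--             if buf:
--                 out.append("".join(buf))
--                 buf = []
--     if buf:
--         out.append("".join(buf))
--     return out
-- ===== SOURCE B (Python) =====
-- from typing import List
--
--
-- def _simple_tokenize(text: str) -> List[str]: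
--     normalized = "".join(ch if ch.isalnum() else " " for ch in text.lower())
--     return normalized.split()
-- ===== Notes on version B (the rewrite author's own statement) =====
-- stated objective: idiomatic
-- what changed: Replaces the stateful buffer-accumulate-and-flush loop with a normalize pass (each non-alphanumeric character of the lowercased text becomes a space) followed by str.split(), which owns all token-boundary logic.
import Mathlib
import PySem

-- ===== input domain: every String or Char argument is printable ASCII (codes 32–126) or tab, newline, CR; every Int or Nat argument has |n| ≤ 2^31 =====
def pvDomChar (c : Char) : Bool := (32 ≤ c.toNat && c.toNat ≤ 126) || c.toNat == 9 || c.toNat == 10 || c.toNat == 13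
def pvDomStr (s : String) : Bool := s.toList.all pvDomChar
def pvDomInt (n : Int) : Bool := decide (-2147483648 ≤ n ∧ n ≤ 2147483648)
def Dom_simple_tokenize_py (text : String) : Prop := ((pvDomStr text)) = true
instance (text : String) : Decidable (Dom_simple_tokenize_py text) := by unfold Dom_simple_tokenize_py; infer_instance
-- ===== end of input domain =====

-- B replaces A's buffer-accumulate-and-flush loop by a normalize pass (non-alphanumerics
-- of the lowercased text become spaces) followed by str.split(); same cost, more idiomatic.


-- ===== PORT A =====
-- loop body of A: `if ch.isalnum(): buf.append(ch) else: if buf: out.append("".join(buf)); buf = []`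
def pvStepA (st : List String × List Char) (ch : Char) : List String × List Char :=
  if PySem.Chars.isalnum ch then (st.1, st.2 ++ [ch])
  else if st.2.isEmpty then st else (st.1 ++ [String.ofList st.2], [])

def simple_tokenize_py (text : String) : List String :=
  let st := (PySem.Chars.lower text.toList).foldl pvStepA ([], [])
  if st.2.isEmpty then st.1 else st.1 ++ [String.ofList st.2]

-- ===== PORT B =====
-- `ch if ch.isalnum() else " "`
def pvNorm (ch : Char) : Char := if PySem.Chars.isalnum ch then ch else ' '

def simple_tokenize_py_alt (text : String) : List String :=
  let normalized := (PySem.Chars.lower text.toList).map pvNorm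
  (PySem.Chars.split₀ normalized).map String.ofList

-- ===== PRECONDITION & SPEC =====
def Spec_simple_tokenize_py (text : String) (out : List String) : Prop := out = simple_tokenize_py_alt text
instance (text : String) (out : List String) : Decidable (Spec_simple_tokenize_py text out) := by unfold Spec_simple_tokenize_py; infer_instance

-- ===== CLAIM (what is proved, stated in full; the proofs are below) =====
def Claim_equal_simple_tokenize_py : Prop := ∀ (text : String), Dom_simple_tokenize_py text → Spec_simple_tokenize_py text (simple_tokenize_py text)

-- ===== LEMMAS AND PROOFS =====

-- finite check over the whole ASCII input domain: after lowering, an alphanumeric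
-- character is never whitespace (isalnum is only evaluated on the 4 domain space chars)
lemma pvCheck : (List.range 128).all (fun n =>
    !(pvDomChar (Char.ofNat n)) ||
    (!(PySem.Chars.isspace (PySem.Chars.lowerChar (Char.ofNat n))) ||
     !(PySem.Chars.isalnum (PySem.Chars.lowerChar (Char.ofNat n))))) = true := by rfl

lemma pvChar (c : Char) (hd : pvDomChar c = true)
    (ha : PySem.Chars.isalnum (PySem.Chars.lowerChar c) = true) :
    PySem.Chars.isspace (PySem.Chars.lowerChar c) = false := by
  have h128 : c.toNat < 128 := by
    unfold pvDomChar at hd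
    simp only [Bool.or_eq_true, Bool.and_eq_true, decide_eq_true_eq, beq_iff_eq] at hd
    omega
  have hm := List.all_eq_true.mp pvCheck c.toNat (List.mem_range.mpr h128)
  rw [Char.ofNat_toNat] at hm
  simp only [hd, ha, Bool.not_true, Bool.or_false, Bool.false_or,
    Bool.not_eq_eq_eq_not] at hm
  simpa using hm

-- rfl-unfoldings of split₀.go (its compiled equations are awkward to rewrite with)
lemma pvGoNil (cur : List Char) (acc : List (List Char)) :
    PySem.Chars.split₀.go [] cur acc =
      if cur.isEmpty then acc.reverse else (cur.reverse :: acc).reverse := rfl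

lemma pvGoCons (c : Char) (ns cur : List Char) (acc : List (List Char)) :
    PySem.Chars.split₀.go (c :: ns) cur acc =
      if PySem.Chars.isspace c then
        (if cur.isEmpty then PySem.Chars.split₀.go ns [] acc
         else PySem.Chars.split₀.go ns [] (cur.reverse :: acc))
      else PySem.Chars.split₀.go ns (c :: cur) acc := rfl

-- split₀.go's accumulator of finished words prepends (reversed) to the result
lemma pvGoAcc (ns : List Char) : ∀ (cur : List Char) (acc : List (List Char)),
    PySem.Chars.split₀.go ns cur acc = acc.reverse ++ PySem.Chars.split₀.go ns cur [] := by
  induction ns with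
  | nil =>
    intro cur acc
    rw [pvGoNil, pvGoNil]
    cases h : cur.isEmpty <;> simp
  | cons c ns ih =>
    intro cur acc
    rw [pvGoCons, pvGoCons]
    cases hs : PySem.Chars.isspace c <;> cases h : cur.isEmpty <;>
      simp [hs, ih (c :: cur) acc, ih [] acc, ih [] (cur.reverse :: acc), ih [] [cur.reverse]]

-- main loop invariant: A's flush loop (plus the final flush) computes out ++ split of the normalized tail
lemma pvMain (cs : List Char)
    (h : ∀ c ∈ cs, PySem.Chars.isalnum c = true → PySem.Chars.isspace c = false) :
    ∀ (out : List String) (buf : List Char),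
    (if (cs.foldl pvStepA (out, buf)).2.isEmpty then (cs.foldl pvStepA (out, buf)).1
     else (cs.foldl pvStepA (out, buf)).1 ++ [String.ofList (cs.foldl pvStepA (out, buf)).2])
    = out ++ (PySem.Chars.split₀.go (cs.map pvNorm) buf.reverse []).map String.ofList := by
  induction cs with
  | nil =>
    intro out buf
    simp only [List.foldl_nil, List.map_nil, pvGoNil]
    cases hb : buf.isEmpty
    · have : buf ≠ [] := by simpa [List.isEmpty_iff] using hb
      simp [hb]
    · have : buf = [] := List.isEmpty_iff.mp hb
      simp [this]
  | cons c cs ih =>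
    intro out buf
    have hmem : ∀ x ∈ cs, PySem.Chars.isalnum x = true → PySem.Chars.isspace x = false :=
      fun x hx => h x (List.mem_cons_of_mem _ hx)
    simp only [List.foldl_cons, List.map_cons]
    cases hc : PySem.Chars.isalnum c
    · -- non-alphanumeric: normalized to ' ', which is whitespace
      have hn : pvNorm c = ' ' := by simp [pvNorm, hc]
      rw [hn]
      have hsp : PySem.Chars.isspace ' ' = true := by rfl
      cases hb : buf.isEmpty
      · -- buf nonempty: A flushes, split₀.go closes the current word
        have hbuf : buf ≠ [] := by simpa [List.isEmpty_iff] using hb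
        have hst : pvStepA (out, buf) c = (out ++ [String.ofList buf], []) := by
          simp [pvStepA, hc, hb]
        rw [hst, ih hmem, pvGoCons]
        have hcur : buf.reverse.isEmpty = false := by
          simp [hbuf]
        rw [pvGoAcc (cs.map pvNorm) [] [buf.reverse.reverse]]
        simp [hsp, hcur]
      · -- buf empty: nothing to flush on either side
        have hbuf : buf = [] := List.isEmpty_iff.mp hb
        have hst : pvStepA (out, buf) c = (out, buf) := by simp [pvStepA, hc, hb]
        rw [hst, ih hmem, pvGoCons]
        simp [hsp, hbuf]
    · -- alphanumeric: appended to the buffer / current word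
      have hn : pvNorm c = c := by simp [pvNorm, hc]
      have hsp : PySem.Chars.isspace c = false := h c List.mem_cons_self hc
      have hst : pvStepA (out, buf) c = (out, buf ++ [c]) := by simp [pvStepA, hc]
      rw [hn, hst, ih hmem, pvGoCons]
      simp [hsp]

-- ===== VERDICT (by name: the statement is the Claim_ definition above) =====
theorem simple_tokenize_py_spec : Claim_equal_simple_tokenize_py := by
  intro text hdom
  unfold Spec_simple_tokenize_py simple_tokenize_py simple_tokenize_py_alt
  have h : ∀ c ∈ PySem.Chars.lower text.toList,
      PySem.Chars.isalnum c = true → PySem.Chars.isspace c = false := by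
    intro c hc ha
    simp only [PySem.Chars.lower, List.mem_map] at hc
    obtain ⟨c0, hc0, rfl⟩ := hc
    have hd : pvDomChar c0 = true := by
      unfold Dom_simple_tokenize_py pvDomStr at hdom
      exact List.all_eq_true.mp hdom c0 hc0
    exact pvChar c0 hd ha
  have := pvMain (PySem.Chars.lower text.toList) h [] []
  simpa [PySem.Chars.split₀] using this
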